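-- pv_equiv track=rewrite | github.com/Idlerz7/Sticker-Selection | scripts/build_stickerchat_style_regroup_assets.py | regroup_members
-- ===== SOURCE A (Python) =====
-- from collections import defaultdict
-- from typing import Any, Dict, Iterable, Iterator, List, Mapping, Optional, Sequence, Tuple
--
-- def regroup_members(
--     pack_to_ids: Mapping[str, Sequence[int]],
--     pack_to_root: Mapping[str, str],
-- ) -> Dict[str, List[int]]:
--     root_to_ids: Dict[str, List[int]] = defaultdict(list)
--     for pack, ids in pack_to_ids.items():
--         root = str(pack_to_root[pack])
--         root_to_ids[root].extend(int(i) for i in ids)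
--     for root in root_to_ids:
--         root_to_ids[root] = sorted(root_to_ids[root])
--     return dict(root_to_ids)
-- ===== SOURCE B (Python) =====
-- def regroup_members(pack_to_ids, pack_to_root):
--     # gather the roots in first-occurrence order (also covers packs with no ids)
--     roots = list(dict.fromkeys(str(pack_to_root[pack]) for pack in pack_to_ids))
--     # one sorted gather per root instead of a dict accumulator
--     return {
--         r: sorted(int(i)
--                   for pack, ids in pack_to_ids.items()
--                   if str(pack_to_root[pack]) == r
--                   for i in ids)
--         for r in roots
--     }
-- ===== Notes on version B (the rewrite author's own statement) =====
-- stated objective: alternative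
-- what changed: Replaces A's defaultdict accumulation plus in-place per-key sorting pass with an ordered dedup of the roots followed by one sorted filter-and-flatten comprehension per root.
import Mathlib
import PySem

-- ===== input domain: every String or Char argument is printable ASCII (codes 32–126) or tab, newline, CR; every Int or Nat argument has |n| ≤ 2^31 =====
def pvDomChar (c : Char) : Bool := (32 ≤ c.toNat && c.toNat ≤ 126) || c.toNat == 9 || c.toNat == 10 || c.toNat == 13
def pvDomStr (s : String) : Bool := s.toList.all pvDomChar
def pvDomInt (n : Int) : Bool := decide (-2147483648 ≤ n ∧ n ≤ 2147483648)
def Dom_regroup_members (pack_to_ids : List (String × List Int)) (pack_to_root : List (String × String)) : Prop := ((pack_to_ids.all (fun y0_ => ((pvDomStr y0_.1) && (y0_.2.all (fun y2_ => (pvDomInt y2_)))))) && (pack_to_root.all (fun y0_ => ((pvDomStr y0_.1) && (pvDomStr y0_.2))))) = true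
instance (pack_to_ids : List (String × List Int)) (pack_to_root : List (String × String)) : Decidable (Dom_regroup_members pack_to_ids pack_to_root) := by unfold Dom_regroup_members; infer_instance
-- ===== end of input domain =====

-- B regroups by an ordered dedup of the roots and one sorted filter-and-flatten per root,
-- instead of A's defaultdict accumulation followed by an in-place per-key sorting pass (objective: alternative).

-- ===== PORT A =====
-- for pack, ids in pack_to_ids.items(): root_to_ids[str(pack_to_root[pack])].extend(int(i) for i in ids)
-- (str/int are identities here; the `none` branch is Python's KeyError, excluded by Pre_)
def regroupFold (rd : PySem.Dict String String) (pack_to_ids : List (String × List Int)) : PySem.Dict String (List Int) :=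
  pack_to_ids.foldl (fun d p =>
    match rd.get? p.1 with
    | some root => d.modify root [] (fun old => old ++ p.2)
    | none => d) PySem.Dict.empty

-- for root in root_to_ids: root_to_ids[root] = sorted(root_to_ids[root])
def sortPass (d : PySem.Dict String (List Int)) : PySem.Dict String (List Int) :=
  d.keys.foldl (fun d' root => d'.insert root (PySem.List.sorted (d'.getD root []) (fun x => x) false)) d

def regroup_members (pack_to_ids : List (String × List Int)) (pack_to_root : List (String × String)) : List (String × List Int) :=
  (sortPass (regroupFold (PySem.Dict.ofList pack_to_root) pack_to_ids)).items

-- ===== PORT B =====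
-- roots = list(dict.fromkeys(str(pack_to_root[pack]) for pack in pack_to_ids))
-- (`.getD ""` is Python's KeyError on a missing pack, excluded by Pre_)
def rootsOf (rd : PySem.Dict String String) (pack_to_ids : List (String × List Int)) : List String :=
  PySem.List.dedup (pack_to_ids.map (fun p => (rd.get? p.1).getD ""))

-- {r: sorted(int(i) for pack, ids in pack_to_ids.items() if str(pack_to_root[pack]) == r for i in ids) for r in roots}
def regroup_members_alt (pack_to_ids : List (String × List Int)) (pack_to_root : List (String × String)) : List (String × List Int) :=
  (rootsOf (PySem.Dict.ofList pack_to_root) pack_to_ids).map (fun r => (r, PySem.List.sorted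
    ((pack_to_ids.filter (fun p => ((PySem.Dict.ofList pack_to_root).get? p.1).getD "" == r)).flatMap (fun p => p.2)) (fun x => x) false))

-- ===== PRECONDITION & SPEC =====
-- Pre_ excludes exactly the inputs where some pack of pack_to_ids is missing from pack_to_root, on which A raises KeyError.
def Pre_regroup_members (pack_to_ids : List (String × List Int)) (pack_to_root : List (String × String)) : Prop :=
  pack_to_ids.all (fun p => (PySem.Dict.ofList pack_to_root).contains p.1) = true
instance (pack_to_ids : List (String × List Int)) (pack_to_root : List (String × String)) : Decidable (Pre_regroup_members pack_to_ids pack_to_root) := by unfold Pre_regroup_members; infer_instance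

def pvWitness_regroup_members : (List (String × List Int)) × (List (String × String)) :=
  ([("a", [3, 1]), ("b", [2]), ("c", [])], [("a", "r"), ("b", "r"), ("c", "s")])

def Spec_regroup_members (pack_to_ids : List (String × List Int)) (pack_to_root : List (String × String)) (out : List (String × List Int)) : Prop := out = regroup_members_alt pack_to_ids pack_to_root
instance (pack_to_ids : List (String × List Int)) (pack_to_root : List (String × String)) (out : List (String × List Int)) : Decidable (Spec_regroup_members pack_to_ids pack_to_root out) := by unfold Spec_regroup_members; infer_instance

-- ===== CLAIM (what is proved, stated in full; the proofs are below) =====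
def Claim_equal_regroup_members : Prop := ∀ (pack_to_ids : List (String × List Int)) (pack_to_root : List (String × String)), Dom_regroup_members pack_to_ids pack_to_root → Pre_regroup_members pack_to_ids pack_to_root → Spec_regroup_members pack_to_ids pack_to_root (regroup_members pack_to_ids pack_to_root)

-- ===== LEMMAS AND PROOFS =====

-- A's first loop, with the lookup made total under Pre_, accumulates per key the flattened ids.
theorem getD_foldl_modify_flat (l : List (String × List Int)) (k : String × List Int → String)
    (d : PySem.Dict String (List Int)) (c : String) :
    (l.foldl (fun d p => d.modify (k p) [] (fun old => old ++ p.2)) d).getD c [] =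
      d.getD c [] ++ (l.filter (fun p => k p == c)).flatMap (fun p => p.2) := by
  induction l generalizing d with
  | nil => simp
  | cons p t ih =>
    simp only [List.foldl_cons, List.filter_cons, ih]
    rw [PySem.Dict.getD_modify]
    by_cases h : k p = c
    · simp [h]
    · rw [if_neg (fun h' => h h'.symm)]
      simp [h]

-- A's second loop sorts each existing entry in place (keys processed once each).
theorem getD_foldl_sortpass (ks : List String) (d : PySem.Dict String (List Int))
    (hnd : ks.Nodup) (c : String) :
    (ks.foldl (fun d' r => d'.insert r (PySem.List.sorted (d'.getD r []) (fun x => x) false)) d).getD c [] =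
      if c ∈ ks then PySem.List.sorted (d.getD c []) (fun x => x) false else d.getD c [] := by
  induction ks generalizing d with
  | nil => simp
  | cons r t ih =>
    simp only [List.foldl_cons, List.mem_cons]
    rcases List.nodup_cons.mp hnd with ⟨hr, ht⟩
    rw [ih _ ht]
    by_cases h : c = r
    · subst h
      simp [hr, PySem.Dict.getD_insert_self]
    · simp [h, PySem.Dict.getD_insert]

theorem regroup_members_spec_aux (pack_to_ids : List (String × List Int)) (pack_to_root : List (String × String))
    (hpre : Pre_regroup_members pack_to_ids pack_to_root) :
    regroup_members pack_to_ids pack_to_root = regroup_members_alt pack_to_ids pack_to_root := by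
  unfold regroup_members regroup_members_alt regroupFold sortPass rootsOf
  set rd := PySem.Dict.ofList pack_to_root with hrd
  have hlook : ∀ p ∈ pack_to_ids, rd.get? p.1 = some ((rd.get? p.1).getD "") := by
    intro p hp
    have := List.all_eq_true.mp hpre p hp
    rw [PySem.Dict.contains_eq_isSome_get?] at this
    cases hq : rd.get? p.1 with
    | none => rw [hq] at this; simp at this
    | some v => simp
  -- make the first loop's lookup total
  have hfold : pack_to_ids.foldl (fun d p =>
      match rd.get? p.1 with
      | some root => d.modify root [] (fun old => old ++ p.2)
      | none => d) PySem.Dict.empty =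
    pack_to_ids.foldl (fun d p => d.modify ((rd.get? p.1).getD "") [] (fun old => old ++ p.2)) PySem.Dict.empty := by
    apply PySem.List.foldl_congr_mem
    intro acc p hp
    rw [hlook p hp]
    rfl
  rw [hfold]
  set d := pack_to_ids.foldl (fun d p => d.modify ((rd.get? p.1).getD "") [] (fun old => old ++ p.2)) PySem.Dict.empty with hd
  have hkeys : d.keys = PySem.List.dedup (pack_to_ids.map (fun p => (rd.get? p.1).getD "")) := by
    rw [hd, PySem.Dict.keys_foldl_modify_key, PySem.Dict.keys_empty, PySem.Set.update_nil_left,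
      PySem.List.dedup_eq_ofList]
  have hndk : d.keys.Nodup := by
    rw [hkeys]; exact PySem.List.nodup_dedup _
  have hget : ∀ c, d.getD c [] =
      (pack_to_ids.filter (fun p => (rd.get? p.1).getD "" == c)).flatMap (fun p => p.2) := by
    intro c
    rw [hd, getD_foldl_modify_flat]
    simp
  set d2 := d.keys.foldl (fun d' root => d'.insert root (PySem.List.sorted (d'.getD root []) (fun x => x) false)) d with hd2
  have hk2 : d2.keys = d.keys := by
    rw [hd2, PySem.Dict.keys_foldl_insert, PySem.Set.update_eq_append_filter]
    have : (PySem.Set.ofList d.keys).filter (fun y => !(PySem.Set.contains d.keys y)) = [] := by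
      apply List.filter_eq_nil_iff.mpr
      intro y hy
      have hyk : y ∈ d.keys := (PySem.Set.mem_ofList _ _).mp hy
      simpa using hyk
    rw [this, List.append_nil]
  have hnd2 : d2.keys.Nodup := by rw [hk2]; exact hndk
  rw [PySem.Dict.items_eq_map_keys d2 hnd2 [], hk2, hkeys]
  apply List.map_congr_left
  intro r hr
  have hrk : r ∈ d.keys := by rw [hkeys]; exact hr
  have := getD_foldl_sortpass d.keys d hndk r
  rw [← hd2] at this
  rw [this, if_pos hrk, hget r]

-- ===== VERDICT (by name: the statement is the Claim_ definition above) =====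
theorem regroup_members_spec : Claim_equal_regroup_members := by
  intro pack_to_ids pack_to_root _ hpre
  unfold Spec_regroup_members
  exact regroup_members_spec_aux pack_to_ids pack_to_root hpre
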